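-- pv_equiv track=rewrite | github.com/gonacon/wiki_export_and_import | src/wiki_migration/importer.py | get_descendant_page_ids
-- ===== SOURCE A (Python) =====
-- def get_descendant_page_ids(pages_info, root_page_id):
--     """특정 페이지의 모든 하위 페이지 ID를 재귀적으로 수집"""
--     descendants = [root_page_id]
--
--     def collect_children(page_id):
--         if page_id in pages_info:
--             for child_id in pages_info[page_id]['children']:
--                 descendants.append(child_id)
--                 collect_children(child_id)
--
--     collect_children(root_page_id)
--     return descendants
-- ===== SOURCE B (Python) =====
-- def get_descendant_page_ids(pages_info, root_page_id):
--     """Iterative pre-order DFS: explicit stack of pending-children frames instead of recursion."""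
--     result = []
--     stack = [[root_page_id]]          # stack of frames; each frame = ids still to visit at that level
--     while stack:
--         frame = stack[-1]
--         if not frame:
--             stack.pop()
--             continue
--         page_id = frame.pop(0)
--         result.append(page_id)
--         if page_id in pages_info:
--             stack.append(list(pages_info[page_id]['children']))
--     return result
-- ===== Notes on version B (the rewrite author's own statement) =====
-- stated objective: alternative
-- what changed: A's recursive closure mutating a shared accumulator is replaced by an iterative while-loop pre-order DFS over an explicit stack of pending-children frames.
import Mathlib
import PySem

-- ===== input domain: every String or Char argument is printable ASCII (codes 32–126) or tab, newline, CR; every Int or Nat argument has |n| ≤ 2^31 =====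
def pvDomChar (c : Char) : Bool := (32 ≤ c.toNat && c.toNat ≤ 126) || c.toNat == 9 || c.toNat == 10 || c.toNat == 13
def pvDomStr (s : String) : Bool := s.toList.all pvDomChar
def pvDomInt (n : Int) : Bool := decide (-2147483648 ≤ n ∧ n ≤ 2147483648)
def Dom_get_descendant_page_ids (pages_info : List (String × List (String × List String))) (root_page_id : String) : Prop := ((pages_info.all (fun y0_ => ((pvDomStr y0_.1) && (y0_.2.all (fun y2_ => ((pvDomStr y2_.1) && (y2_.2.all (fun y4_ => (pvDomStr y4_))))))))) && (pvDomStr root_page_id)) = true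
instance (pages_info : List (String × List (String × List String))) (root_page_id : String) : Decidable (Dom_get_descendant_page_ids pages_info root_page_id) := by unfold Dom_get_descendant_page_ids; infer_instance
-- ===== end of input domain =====

-- B replaces A's recursive closure with an iterative explicit-stack DFS (same return value on Pre_; objective: alternative decomposition).

-- first-match association-list lookup (Python dict lookup; generated dicts have unique keys)
def pvGetKey? {α : Type} (d : List (String × α)) (k : String) : Option α :=
  match d with
  | [] => none
  | (k', v) :: rest => if k' = k then some v else pvGetKey? rest k

-- removing a key: used by BOTH ports purely as a termination guard; a removed key would be
-- looked up again only when the same id recurs on its own ancestor path, i.e. on a cycle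
-- reachable from the root, where the Python functions do not return (outside Pre_).
def pvDropKey {α : Type} (d : List (String × α)) (k : String) : List (String × α) :=
  d.filter (fun e => decide (e.1 ≠ k))

-- fuel bound for port B's loop: a weight that strictly drops at every iteration
def pvInnerTotal (info : List (String × List String)) : Nat :=
  (info.map (fun e => e.2.length)).sum

def pvK (p : List (String × List (String × List String))) : Nat :=
  (p.map (fun e => pvInnerTotal e.2)).sum + 2

def pvQ (p : List (String × List (String × List String))) : Nat :=
  pvK p ^ (p.length + 1)

def pvW (frames : List ((List (String × List (String × List String))) × List String)) : Nat :=
  (frames.map (fun f => (f.2.length + 1) * pvQ f.1)).sum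

-- ===== PORT A =====
-- A's recursive closure `collect_children` with its shared accumulator `descendants`.
-- Totality guards only: the fuel (recursion depth ≤ pages.length + 1, since each level
-- removes the current key) never runs out, and pvDropKey is explained above; where Python
-- raises KeyError on a missing 'children' key the port reads [] (outside Pre_).
def pvCollectA (fuel : Nat) (pages : List (String × List (String × List String)))
    (page_id : String) (descendants : List String) : List String :=
  match fuel with
  | 0 => descendants
  | fuel + 1 =>
    match pvGetKey? pages page_id with
    | none => descendants
    | some info =>
      ((pvGetKey? info "children").getD []).foldl
        (fun ds child_id => pvCollectA fuel (pvDropKey pages page_id) child_id (ds ++ [child_id]))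
        descendants

def get_descendant_page_ids (pages_info : List (String × List (String × List String))) (root_page_id : String) : List String :=
  pvCollectA (pages_info.length + 1) pages_info root_page_id [root_page_id]

-- ===== PORT B =====
-- Source B's while loop over a stack of pending-children frames (list head = stack top).
-- Totality guards only: the fuel (pvW strictly drops each iteration, so pvW + 1 never runs
-- out) and the frames' pages component (see pvDropKey above).
def pvLoopB (fuel : Nat)
    (frames : List ((List (String × List (String × List String))) × List String))
    (result : List String) : List String :=
  match fuel with
  | 0 => result
  | fuel + 1 =>
    match frames with
    | [] => result
    | (_, []) :: fs => pvLoopB fuel fs result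
    | (pages, c :: cs) :: fs =>
      match pvGetKey? pages c with
      | none => pvLoopB fuel ((pages, cs) :: fs) (result ++ [c])
      | some info =>
        pvLoopB fuel ((pvDropKey pages c, (pvGetKey? info "children").getD []) :: (pages, cs) :: fs)
          (result ++ [c])

def get_descendant_page_ids_alt (pages_info : List (String × List (String × List String))) (root_page_id : String) : List String :=
  pvLoopB (pvW [(pages_info, [root_page_id])] + 1) [(pages_info, [root_page_id])] []

-- ===== PRECONDITION & SPEC =====
-- children of a key under Python's lookup (missing entry or missing 'children' ↦ [])
def pvKidsOf (pages : List (String × List (String × List String))) (k : String) : List String :=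
  match pvGetKey? pages k with
  | none => []
  | some info => (pvGetKey? info "children").getD []

-- one step of graph closure: add every child of a member
def pvStepR (pages : List (String × List (String × List String))) (s : List String) : List String :=
  (s ++ s.flatMap (pvKidsOf pages)).dedup

-- bounded transitive closure = the set of page ids reachable from the seed in the child
-- graph (pages.length + 1 iterations saturate: new ids only arise as children of keys,
-- and at most pages.length distinct keys can ever enter the set)
def pvReachFrom (pages : List (String × List (String × List String))) (seed : List String) : List String :=
  (pvStepR pages)^[pages.length + 1] seed

-- Pre_ excludes exactly the inputs on which Python A does not return normally: a page id
-- reachable from the root whose (first-match) entry lacks a 'children' key (A raises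
-- KeyError there), or a reachable id lying on a cycle of the child graph (A recurses
-- forever / raises RecursionError). Both are stated as closed-form graph-reachability
-- conditions on the input, not by running either port.
def Pre_get_descendant_page_ids (pages_info : List (String × List (String × List String))) (root_page_id : String) : Prop :=
  (∀ k ∈ pvReachFrom pages_info [root_page_id], ∀ info, pvGetKey? pages_info k = some info →
      "children" ∈ info.map Prod.fst)
  ∧ (∀ k ∈ pvReachFrom pages_info [root_page_id], k ∉ pvReachFrom pages_info (pvKidsOf pages_info k))

instance (pages_info : List (String × List (String × List String))) (root_page_id : String) : Decidable (Pre_get_descendant_page_ids pages_info root_page_id) := by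
  unfold Pre_get_descendant_page_ids; infer_instance

def pvWitness_get_descendant_page_ids : (List (String × List (String × List String))) × String :=
  ([("r", [("children", ["a", "b"])]), ("a", [("children", [])])], "r")

def Spec_get_descendant_page_ids (pages_info : List (String × List (String × List String))) (root_page_id : String) (out : List String) : Prop := out = get_descendant_page_ids_alt pages_info root_page_id
instance (pages_info : List (String × List (String × List String))) (root_page_id : String) (out : List String) : Decidable (Spec_get_descendant_page_ids pages_info root_page_id out) := by unfold Spec_get_descendant_page_ids; infer_instance

-- ===== CLAIM (what is proved, stated in full; the proofs are below) =====
def Claim_equal_get_descendant_page_ids : Prop := ∀ (pages_info : List (String × List (String × List String))) (root_page_id : String), Dom_get_descendant_page_ids pages_info root_page_id → Pre_get_descendant_page_ids pages_info root_page_id → Spec_get_descendant_page_ids pages_info root_page_id (get_descendant_page_ids pages_info root_page_id)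

-- ===== LEMMAS AND PROOFS =====

theorem pvGetKey?_mem {α : Type} (d : List (String × α)) (k : String) (v : α)
    (h : pvGetKey? d k = some v) : (k, v) ∈ d := by
  induction d with
  | nil => simp [pvGetKey?] at h
  | cons e rest ih =>
    obtain ⟨k', v'⟩ := e
    by_cases hk : k' = k
    · subst hk; simp [pvGetKey?] at h; simp [h]
    · simp [pvGetKey?, hk] at h; exact List.mem_cons_of_mem _ (ih h)

theorem pv_le_sum_map {α : Type} (f : α → Nat) (l : List α) (x : α) (hx : x ∈ l) :
    f x ≤ (l.map f).sum := by
  induction l with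
  | nil => simp at hx
  | cons a t ih =>
    rcases List.mem_cons.mp hx with h | h
    · subst h; simp
    · simpa using Nat.le_trans (ih h) (by simp)

theorem pv_sum_map_filter_le {α : Type} (f : α → Nat) (q : α → Bool) (l : List α) :
    ((l.filter q).map f).sum ≤ (l.map f).sum := by
  induction l with
  | nil => simp
  | cons a t ih =>
    by_cases hq : q a = true
    · simp [hq]; omega
    · simp [hq]; omega

theorem pvDropKey_length_lt {α : Type} (d : List (String × α)) (k : String) (v : α)
    (h : pvGetKey? d k = some v) : (pvDropKey d k).length < d.length := by
  have hmem := pvGetKey?_mem d k v h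
  unfold pvDropKey
  refine List.length_filter_lt_length_iff_exists.mpr ⟨(k, v), hmem, ?_⟩
  simp

theorem pvK_drop_le (p : List (String × List (String × List String))) (k : String) :
    pvK (pvDropKey p k) ≤ pvK p := by
  unfold pvK pvDropKey
  have := pv_sum_map_filter_le (fun e => pvInnerTotal e.2)
    (fun (e : String × List (String × List String)) => decide (e.1 ≠ k)) p
  omega

theorem pvKids_len_le (p : List (String × List (String × List String))) (c : String)
    (info : List (String × List String)) (h : pvGetKey? p c = some info) :
    ((pvGetKey? info "children").getD []).length + 2 ≤ pvK p := by
  have hpi : pvInnerTotal info ≤ (p.map (fun e => pvInnerTotal e.2)).sum := by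
    simpa using pv_le_sum_map (fun (e : String × List (String × List String)) => pvInnerTotal e.2)
      p (c, info) (pvGetKey?_mem p c info h)
  unfold pvK
  cases hk : pvGetKey? info "children" with
  | none => simp
  | some kids =>
    have hkid : kids.length ≤ pvInnerTotal info := by
      simpa using pv_le_sum_map (fun (e : String × List String) => e.2.length)
        info ("children", kids) (pvGetKey?_mem info "children" kids hk)
    simp
    omega

theorem pvQ_pos (p : List (String × List (String × List String))) : 0 < pvQ p := by
  unfold pvQ pvK
  exact Nat.pow_pos (by omega)

theorem pvStep_lt (p : List (String × List (String × List String))) (c : String)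
    (info : List (String × List String)) (h : pvGetKey? p c = some info) :
    (((pvGetKey? info "children").getD []).length + 1) * pvQ (pvDropKey p c) < pvQ p := by
  set n := ((pvGetKey? info "children").getD []).length with hn
  have hK2 : 2 ≤ pvK p := by unfold pvK; omega
  have hlt : n + 1 < pvK p := by have := pvKids_len_le p c info h; omega
  have hL : (pvDropKey p c).length < p.length := pvDropKey_length_lt p c info h
  have hKle : pvK (pvDropKey p c) ≤ pvK p := pvK_drop_le p c
  have hQ' : pvQ (pvDropKey p c) ≤ pvK p ^ p.length := by
    unfold pvQ
    calc pvK (pvDropKey p c) ^ ((pvDropKey p c).length + 1)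
        ≤ pvK p ^ ((pvDropKey p c).length + 1) := Nat.pow_le_pow_left hKle _
      _ ≤ pvK p ^ p.length := Nat.pow_le_pow_right (by omega) (by omega)
  have hpos : 0 < pvK p ^ p.length := Nat.pow_pos (by omega)
  calc (n + 1) * pvQ (pvDropKey p c)
      ≤ (n + 1) * (pvK p ^ p.length) := Nat.mul_le_mul_left _ hQ'
    _ < pvK p * (pvK p ^ p.length) := (Nat.mul_lt_mul_right hpos).mpr hlt
    _ = pvK p ^ (p.length + 1) := by rw [Nat.pow_succ]; ring
    _ = pvQ p := rfl

theorem pvW_cons (p : List (String × List (String × List String))) (l : List String)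
    (fs : List ((List (String × List (String × List String))) × List String)) :
    pvW ((p, l) :: fs) = (l.length + 1) * pvQ p + pvW fs := by
  simp [pvW]

theorem pvDec1 (q : List (String × List (String × List String)))
    (fs : List ((List (String × List (String × List String))) × List String)) :
    pvW fs < pvW ((q, []) :: fs) := by
  rw [pvW_cons]
  simp only [List.length_nil]
  have := pvQ_pos q
  omega

theorem pvDec2 (p : List (String × List (String × List String))) (c : String) (cs : List String)
    (fs : List ((List (String × List (String × List String))) × List String)) :
    pvW ((p, cs) :: fs) < pvW ((p, c :: cs) :: fs) := by
  rw [pvW_cons, pvW_cons]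
  have hq := pvQ_pos p
  have hr : ((c :: cs).length + 1) * pvQ p = (cs.length + 1) * pvQ p + pvQ p := by
    simp only [List.length_cons]; ring
  omega

theorem pvDec3 (p : List (String × List (String × List String))) (c : String) (cs : List String)
    (fs : List ((List (String × List (String × List String))) × List String))
    (info : List (String × List String)) (h : pvGetKey? p c = some info) :
    pvW ((pvDropKey p c, (pvGetKey? info "children").getD []) :: (p, cs) :: fs)
      < pvW ((p, c :: cs) :: fs) := by
  rw [pvW_cons, pvW_cons, pvW_cons]
  have hs := pvStep_lt p c info h
  have hr : ((c :: cs).length + 1) * pvQ p = (cs.length + 1) * pvQ p + pvQ p := by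
    simp only [List.length_cons]; ring
  omega

-- reference versions by well-founded recursion (proof-side only)
mutual
def pvCollectW (pages : List (String × List (String × List String))) (page_id : String)
    (descendants : List String) : List String :=
  match h : pvGetKey? pages page_id with
  | none => descendants
  | some info => pvKidsW (pvDropKey pages page_id) ((pvGetKey? info "children").getD []) descendants
  termination_by (pages.length, 0, 0)
  decreasing_by
  · exact Prod.Lex.left _ _ (pvDropKey_length_lt pages page_id info h)
def pvKidsW (pages : List (String × List (String × List String))) (kids : List String)
    (descendants : List String) : List String :=
  match kids with
  | [] => descendants
  | c :: cs => pvKidsW pages cs (pvCollectW pages c (descendants ++ [c]))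
  termination_by (pages.length, 1, kids.length)
  decreasing_by
  · exact Prod.Lex.right _ (Prod.Lex.left _ _ (by omega))
  · exact Prod.Lex.right _ (Prod.Lex.right _ (by simp only [List.length_cons]; omega))
end

def pvLoopW (frames : List ((List (String × List (String × List String))) × List String))
    (result : List String) : List String :=
  match frames with
  | [] => result
  | (_, []) :: fs => pvLoopW fs result
  | (pages, c :: cs) :: fs =>
    match h : pvGetKey? pages c with
    | none => pvLoopW ((pages, cs) :: fs) (result ++ [c])
    | some info =>
      pvLoopW ((pvDropKey pages c, (pvGetKey? info "children").getD []) :: (pages, cs) :: fs)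
        (result ++ [c])
termination_by pvW frames
decreasing_by
  · exact pvDec1 _ fs
  · exact pvDec2 pages c cs fs
  · exact pvDec3 pages c cs fs info h

-- the fuelled port A computes the reference recursion (the fuel never runs out)
theorem pvCollectA_eq (fuel : Nat) (pages : List (String × List (String × List String)))
    (page_id : String) (descendants : List String) (hf : pages.length < fuel) :
    pvCollectA fuel pages page_id descendants = pvCollectW pages page_id descendants := by
  induction fuel generalizing pages page_id descendants with
  | zero => omega
  | succ fuel ih =>
    cases h : pvGetKey? pages page_id with
    | none =>
      rw [show pvCollectW pages page_id descendants = descendants from by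
        rw [pvCollectW]; rw [h]]
      rw [pvCollectA]; rw [h]
    | some info =>
      have hf' : (pvDropKey pages page_id).length < fuel := by
        have := pvDropKey_length_lt pages page_id info h
        omega
      rw [show pvCollectW pages page_id descendants
            = pvKidsW (pvDropKey pages page_id) ((pvGetKey? info "children").getD []) descendants from by
        rw [pvCollectW]; rw [h]]
      rw [show pvCollectA (fuel + 1) pages page_id descendants
            = ((pvGetKey? info "children").getD []).foldl
                (fun ds child_id =>
                  pvCollectA fuel (pvDropKey pages page_id) child_id (ds ++ [child_id]))
                descendants from by
        rw [pvCollectA]; rw [h]]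
      generalize ((pvGetKey? info "children").getD []) = kids
      generalize hpg : pvDropKey pages page_id = pages' at hf' ⊢
      induction kids generalizing descendants with
      | nil => rw [pvKidsW]; rfl
      | cons c cs ihk =>
        rw [show pvKidsW pages' (c :: cs) descendants
              = pvKidsW pages' cs (pvCollectW pages' c (descendants ++ [c])) from by
          rw [pvKidsW]]
        simp only [List.foldl_cons]
        rw [ih pages' c (descendants ++ [c]) hf']
        exact ihk (pvCollectW pages' c (descendants ++ [c]))

-- the fuelled port B computes the reference loop (the fuel never runs out)
theorem pvLoopB_eq (fuel : Nat)
    (frames : List ((List (String × List (String × List String))) × List String))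
    (result : List String) (hf : pvW frames < fuel) :
    pvLoopB fuel frames result = pvLoopW frames result := by
  induction fuel generalizing frames result with
  | zero => omega
  | succ fuel ih =>
    match frames with
    | [] => rw [pvLoopB, pvLoopW]
    | (q, []) :: fs =>
      rw [pvLoopB, pvLoopW]
      exact ih fs result (by have := pvDec1 q fs; omega)
    | (pages, c :: cs) :: fs =>
      rw [pvLoopB, pvLoopW]
      cases h : pvGetKey? pages c with
      | none =>
        exact ih ((pages, cs) :: fs) (result ++ [c]) (by have := pvDec2 pages c cs fs; omega)
      | some info =>
        exact ih _ (result ++ [c]) (by have := pvDec3 pages c cs fs info h; omega)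

-- the bridge: running one frame of B's loop performs exactly A's child sweep on that frame
theorem pvBridge (p : List (String × List (String × List String))) (kids : List String)
    (fs : List ((List (String × List (String × List String))) × List String))
    (acc : List String) :
    pvLoopW ((p, kids) :: fs) acc = pvLoopW fs (pvKidsW p kids acc) := by
  match kids with
  | [] => simp [pvLoopW, pvKidsW]
  | c :: cs =>
    cases h : pvGetKey? p c with
    | none =>
      rw [show pvLoopW ((p, c :: cs) :: fs) acc = pvLoopW ((p, cs) :: fs) (acc ++ [c]) from by
        rw [pvLoopW]; rw [h]]
      rw [pvBridge p cs fs (acc ++ [c])]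
      rw [show pvKidsW p (c :: cs) acc = pvKidsW p cs (acc ++ [c]) from by
        rw [pvKidsW, pvCollectW, h]]
    | some info =>
      rw [show pvLoopW ((p, c :: cs) :: fs) acc
            = pvLoopW ((pvDropKey p c, (pvGetKey? info "children").getD []) :: (p, cs) :: fs)
                (acc ++ [c]) from by rw [pvLoopW]; rw [h]]
      rw [pvBridge (pvDropKey p c) ((pvGetKey? info "children").getD []) ((p, cs) :: fs) (acc ++ [c])]
      rw [pvBridge p cs fs]
      rw [show pvKidsW p (c :: cs) acc
            = pvKidsW p cs (pvKidsW (pvDropKey p c) ((pvGetKey? info "children").getD []) (acc ++ [c])) from by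
        rw [pvKidsW, pvCollectW, h]]
termination_by pvW ((p, kids) :: fs)
decreasing_by
  · exact pvDec2 p c cs fs
  · exact pvDec3 p c cs fs info h
  · exact pvDec2 p c cs fs

theorem pv_ab_eq (pages_info : List (String × List (String × List String))) (root_page_id : String) :
    get_descendant_page_ids pages_info root_page_id
      = get_descendant_page_ids_alt pages_info root_page_id := by
  unfold get_descendant_page_ids get_descendant_page_ids_alt
  rw [pvCollectA_eq _ _ _ _ (by omega), pvLoopB_eq _ _ _ (by omega), pvBridge]
  rw [show pvKidsW pages_info [root_page_id] [] = pvCollectW pages_info root_page_id [root_page_id] from by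
    rw [pvKidsW, pvKidsW]; simp]
  rw [pvLoopW]

-- ===== VERDICT (by name: the statement is the Claim_ definition above) =====
theorem get_descendant_page_ids_spec : Claim_equal_get_descendant_page_ids := by
  intro pages_info root_page_id _ _
  unfold Spec_get_descendant_page_ids
  exact pv_ab_eq pages_info root_page_id
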